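-- pv_equiv track=rewrite | github.com/NAU-OSS/Group-1 | assignmentPR/ConversionFunctions.py | mantissaFun
-- ===== SOURCE A (Python) =====
-- def mantissaFun(numString, numerator, demoninator):
--     try:
--         value = numString.split(".")[1]
--         numerator[0] = int(value)
--         count = 1
--         for i in value:
--             count = count * 10
--         demoninator[0] = count
--         return True
--     except:
--         return False
-- ===== SOURCE B (Python) =====
-- def mantissaFun(numString, numerator, demoninator):
--     # One-pass automaton instead of split()+counting loop: walk the characters
--     # once, collecting the fragment between the first and second '.' and its
--     # power-of-ten weight as we go. Return-value equivalent to A; side effects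
--     # differ slightly (A writes numerator[0] even when demoninator is empty,
--     # B mutates only on the success path).
--     seen = False
--     frac = ""
--     den = 1
--     for ch in numString:
--         if not seen:
--             if ch == ".":
--                 seen = True
--         elif ch == ".":
--             break
--         else:
--             frac += ch
--             den *= 10
--     if not seen or not numerator or not demoninator:
--         return False
--     try:
--         numerator[0] = int(frac)
--     except ValueError:
--         return False
--     demoninator[0] = den
--     return True
-- ===== Notes on version B (the rewrite author's own statement) =====
-- stated objective: alternative
-- what changed: Replaces A's split('.')-then-index-then-count-loop pipeline with a single-pass character automaton that walks the string once, collecting the fragment between the first and second dot and its power-of-ten weight in the same pass; split(), indexing into the pieces list and the separate count*=10 loop all disappear.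
import Mathlib
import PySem

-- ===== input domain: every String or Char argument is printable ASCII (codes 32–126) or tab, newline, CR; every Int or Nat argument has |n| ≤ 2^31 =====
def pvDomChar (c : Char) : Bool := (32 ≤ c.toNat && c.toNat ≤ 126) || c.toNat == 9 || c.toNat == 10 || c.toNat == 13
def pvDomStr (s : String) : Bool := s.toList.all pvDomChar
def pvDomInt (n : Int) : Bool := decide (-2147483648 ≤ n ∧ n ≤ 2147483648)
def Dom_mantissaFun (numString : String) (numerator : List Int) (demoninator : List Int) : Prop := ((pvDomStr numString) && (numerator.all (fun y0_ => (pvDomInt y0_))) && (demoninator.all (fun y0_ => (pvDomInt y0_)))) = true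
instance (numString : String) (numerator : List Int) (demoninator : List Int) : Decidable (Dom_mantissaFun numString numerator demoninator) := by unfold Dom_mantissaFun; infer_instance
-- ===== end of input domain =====

-- ===== PORT A =====
-- One honest line: B replaces A's split/index/count-loop pipeline by a single-pass
-- character automaton; return value only (A also mutates numerator[0]/demoninator[0]
-- in place, B mutates only on the success path).
def mantissaFun (numString : String) (numerator : List Int) (demoninator : List Int) : Bool :=
  -- try: value = numString.split(".")[1]
  match PySem.Str.split? numString "." with
  | none => false          -- unreachable: separator "." is non-empty
  | some parts =>
    match PySem.List.pyGet? parts 1 with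
    | none => false        -- IndexError → except → return False
    | some value =>
      -- numerator[0] = int(value)
      match PySem.Int.ofStr? value with
      | none => false      -- ValueError → except → return False
      | some _v =>
        if numerator.length = 0 then false   -- numerator[0] = … raises IndexError
        else
          -- count = 1; for i in value: count = count * 10
          let _count := value.toList.foldl (fun c _ => c * 10) (1 : Int)
          -- demoninator[0] = count
          if demoninator.length = 0 then false  -- IndexError → except → return False
          else true  -- return True

-- ===== PORT B =====
-- the 'for ch in numString' automaton of Source B: state (seen, frac, den); 'break' on a
-- second dot becomes returning the state without recursing
def pvScanB : List Char → Bool → List Char → Int → Bool × List Char × Int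
  | [], seen, frac, den => (seen, frac, den)
  | c :: rest, seen, frac, den =>
    if !seen then
      (if c = '.' then pvScanB rest true frac den else pvScanB rest false frac den)
    else if c = '.' then (seen, frac, den)   -- break
    else pvScanB rest seen (frac ++ [c]) (den * 10)

def mantissaFun_alt (numString : String) (numerator : List Int) (demoninator : List Int) : Bool :=
  match pvScanB numString.toList false [] 1 with
  | (seen, frac, _den) =>
    if !seen || numerator.length = 0 || demoninator.length = 0 then false
    else
      -- numerator[0] = int(frac)
      match PySem.Int.ofChars? frac with
      | none => false      -- ValueError → return False
      | some _n => true    -- demoninator[0] = den; return True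

-- ===== PRECONDITION & SPEC =====
def Spec_mantissaFun (numString : String) (numerator : List Int) (demoninator : List Int) (out : Bool) : Prop := out = mantissaFun_alt numString numerator demoninator
instance (numString : String) (numerator : List Int) (demoninator : List Int) (out : Bool) : Decidable (Spec_mantissaFun numString numerator demoninator out) := by unfold Spec_mantissaFun; infer_instance

-- ===== CLAIM (what is proved, stated in full; the proofs are below) =====
def Claim_equal_mantissaFun : Prop := ∀ (numString : String) (numerator : List Int) (demoninator : List Int), Dom_mantissaFun numString numerator demoninator → Spec_mantissaFun numString numerator demoninator (mantissaFun numString numerator demoninator)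

-- ===== LEMMAS AND PROOFS =====

-- Proof-only reference split (never used by the ports): pvSF is Python s.split(".") on a char list.
def pvSF : List Char → List (List Char)
  | [] => [[]]
  | c :: rest => if c = '.' then [] :: pvSF rest else (pvSF rest).modifyHead (c :: ·)

theorem pvSF_ne_nil (l : List Char) : pvSF l ≠ [] := by
  induction l with
  | nil => simp [pvSF]
  | cons c rest ih =>
      simp only [pvSF]
      split
      · simp
      · cases h : pvSF rest with
        | nil => exact absurd h ih
        | cons a t => simp [List.modifyHead]

theorem pv_go_eq (fuel : Nat) (l cur : List Char) (acc : List (List Char))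
    (h : l.length ≤ fuel) :
    PySem.Chars.splitOn.go ['.'] fuel l cur acc
      = acc.reverse ++ (pvSF l).modifyHead (cur.reverse ++ ·) := by
  induction fuel generalizing l cur acc with
  | zero =>
      interval_cases hl : l.length
      have : l = [] := List.length_eq_zero_iff.mp hl
      subst this
      simp [PySem.Chars.splitOn.go, pvSF, List.modifyHead]
  | succ fuel ih =>
      cases l with
      | nil => simp [PySem.Chars.splitOn.go, pvSF, List.modifyHead]
      | cons c rest =>
          simp only [PySem.Chars.splitOn.go]
          by_cases hc : c = '.'
          · subst hc
            rw [if_pos (by simp [List.isPrefixOf])]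
            simp only [List.length_cons, List.drop_succ_cons, List.length_nil, List.drop_zero]
            rw [ih rest [] (cur.reverse :: acc) (by simpa using Nat.lt_succ_iff.mp (by simpa using h))]
            simp only [pvSF, List.modifyHead, List.reverse_cons, List.append_assoc,
              List.reverse_nil, List.nil_append, List.singleton_append]
            cases pvSF rest <;> simp
          · rw [if_neg (by simp [List.isPrefixOf]; exact fun h => hc h.symm)]
            rw [ih rest (c :: cur) acc (by simpa using Nat.lt_succ_iff.mp (by simpa using h))]
            simp only [pvSF, if_neg hc]
            cases hsf : pvSF rest with
            | nil => exact absurd hsf (pvSF_ne_nil rest)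
            | cons a t => simp [List.modifyHead]

theorem pv_splitOn_eq (l : List Char) : PySem.Chars.splitOn l ['.'] = pvSF l := by
  rw [PySem.Chars.splitOn, pv_go_eq _ _ _ _ (Nat.le_succ _)]
  cases h : pvSF l with
  | nil => exact absurd h (pvSF_ne_nil l)
  | cons a t => simp [List.modifyHead]

theorem pvSF_no_dot (l : List Char) (h : '.' ∉ l) : pvSF l = [l] := by
  induction l with
  | nil => simp [pvSF]
  | cons c rest ih =>
      simp only [pvSF]
      rw [if_neg (by intro hc; exact h (hc ▸ List.mem_cons_self))]
      rw [ih (fun hm => h (List.mem_cons_of_mem _ hm))]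
      simp [List.modifyHead]

theorem pvSF_head (l : List Char) : (pvSF l)[0]? = some (l.takeWhile (· ≠ '.')) := by
  induction l with
  | nil => simp [pvSF, List.takeWhile]
  | cons c rest ih =>
      simp only [pvSF, List.takeWhile]
      by_cases hc : c = '.'
      · simp [hc]
      · rw [if_neg hc]
        cases hsf : pvSF rest with
        | nil => exact absurd hsf (pvSF_ne_nil rest)
        | cons a t =>
            rw [hsf] at ih
            simp at ih
            simp [List.modifyHead, hc, ih]

theorem pvSF_second (l : List Char) (h : '.' ∈ l) :
    (pvSF l)[1]? = some (((l.dropWhile (· ≠ '.')).drop 1).takeWhile (· ≠ '.')) := by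
  induction l with
  | nil => simp at h
  | cons c rest ih =>
      simp only [pvSF]
      by_cases hc : c = '.'
      · rw [if_pos hc, List.dropWhile_cons_of_neg (by simp [hc])]
        simpa using pvSF_head rest
      · rw [if_neg hc, List.dropWhile_cons_of_pos (by simp [hc])]
        have hm : '.' ∈ rest := by
          rcases List.mem_cons.mp h with h1 | h1
          · exact absurd h1.symm hc
          · exact h1
        have := ih hm
        cases hsf : pvSF rest with
        | nil => exact absurd hsf (pvSF_ne_nil rest)
        | cons a t =>
            rw [hsf] at this
            simpa [List.modifyHead] using this

-- the automaton after the first dot: it collects exactly the chars up to the next dot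
theorem pvScanB_true (r : List Char) (a : List Char) (d : Int) :
    pvScanB r true a d
      = (true, a ++ r.takeWhile (· ≠ '.'), d * 10 ^ (r.takeWhile (· ≠ '.')).length) := by
  induction r generalizing a d with
  | nil => simp [pvScanB, List.takeWhile]
  | cons c rest ih =>
      simp only [pvScanB, List.takeWhile, Bool.not_true, Bool.false_eq_true, if_false]
      by_cases hc : c = '.'
      · simp [hc]
      · simp only [hc, if_false, decide_not]
        rw [ih]
        simp [List.append_assoc, pow_succ]
        ring

-- the automaton before the first dot: skip to the first dot, or finish with seen = false
theorem pvScanB_false_no_dot (l : List Char) (a : List Char) (d : Int) (h : '.' ∉ l) :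
    pvScanB l false a d = (false, a, d) := by
  induction l with
  | nil => simp [pvScanB]
  | cons c rest ih =>
      have hc : c ≠ '.' := fun hc => h (hc ▸ List.mem_cons_self)
      simp only [pvScanB, Bool.not_false, if_true, if_neg hc]
      exact ih (fun hm => h (List.mem_cons_of_mem _ hm))

theorem pvScanB_false_dot (l : List Char) (a : List Char) (d : Int) (h : '.' ∈ l) :
    pvScanB l false a d = pvScanB ((l.dropWhile (· ≠ '.')).drop 1) true a d := by
  induction l with
  | nil => simp at h
  | cons c rest ih =>
      simp only [pvScanB, Bool.not_false, if_true]
      by_cases hc : c = '.'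
      · rw [if_pos hc, List.dropWhile_cons_of_neg (by simp [hc])]
        simp
      · have hm : '.' ∈ rest := by
          rcases List.mem_cons.mp h with h1 | h1
          · exact absurd h1.symm hc
          · exact h1
        rw [if_neg hc, List.dropWhile_cons_of_pos (by simp [hc])]
        exact ih hm

-- ===== VERDICT (by name: the statement is the Claim_ definition above) =====
theorem mantissaFun_spec : Claim_equal_mantissaFun := by
  intro numString numerator demoninator _hdom
  unfold Spec_mantissaFun mantissaFun mantissaFun_alt
  simp only [PySem.Str.split?, PySem.Chars.split?,
    show (".".toList) = ['.'] from rfl, List.isEmpty_cons, Bool.false_eq_true,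
    if_false, Option.map_some, pv_splitOn_eq]
  simp only [show ((1 : Int)) = ((1 : Nat) : Int) from rfl, PySem.List.pyGet?_natCast,
    List.getElem?_map]
  by_cases hdot : '.' ∈ numString.toList
  · -- a dot is present: A reads piece [1], B's automaton collects the same fragment
    rw [pvSF_second _ hdot, pvScanB_false_dot _ _ _ hdot, pvScanB_true]
    simp only [Option.map_some, List.nil_append]
    rw [PySem.Int.ofStr?_ofList]
    cases hof : PySem.Int.ofChars?
        (((numString.toList.dropWhile (· ≠ '.')).drop 1).takeWhile (· ≠ '.')) with
    | none =>
        by_cases hn : numerator.length = 0 <;> by_cases hd : demoninator.length = 0 <;>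
          simp [hn, hd]
    | some w =>
        by_cases hn : numerator.length = 0 <;> by_cases hd : demoninator.length = 0 <;>
          simp [hn, hd]
  · -- no dot: A's split has a single piece (IndexError), B's automaton ends with seen = false
    rw [pvSF_no_dot _ hdot, pvScanB_false_no_dot _ _ _ hdot]
    simp
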